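-- pv_equiv track=rewrite | github.com/christian-oudard/advent_of_code | 2015/day15.py | optimal_mixture
-- ===== SOURCE A (Python) =====
-- from functools import reduce
-- from operator import mul
-- from itertools import combinations_with_replacement, pairwise
--
-- def score(ingredients, mixture):
--     """
--     >>> ingredients = [
--     ... {'name': 'Butterscotch', 'capacity': -1, 'durability': -2, 'flavor': 6, 'texture': 3, 'calories': 8},
--     ... {'name': 'Cinnamon', 'capacity': 2, 'durability': 3, 'flavor': -2, 'texture': -1, 'calories': 3},
--     ... ]
--     >>> score(ingredients, (44, 56))
--     62842880
--     """
--     ingredient_scores = []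
--     for prop in ['capacity', 'durability', 'flavor', 'texture']:
--         ingredient_scores.append(
--             sum(
--                 ingr[prop] * amount
--                 for ingr, amount in zip(ingredients, mixture)
--             )
--         )
--     if any( s <= 0 for s in ingredient_scores ):
--         return 0
--     return product(ingredient_scores)
--
-- def calories(ingredients, mixture):
--     return sum(
--         ingr['calories'] * amount
--         for ingr, amount in zip(ingredients, mixture)
--     )
--
-- def product(iterable):
--     return reduce(mul, iterable)
--
-- def optimal_mixture(ingredients, total_amount=100, target_calories=None):
--     """
--     >>> ingredients = [
--     ... {'name': 'Butterscotch', 'capacity': -1, 'durability': -2, 'flavor': 6, 'texture': 3, 'calories': 8},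
--     ... {'name': 'Cinnamon', 'capacity': 2, 'durability': 3, 'flavor': -2, 'texture': -1, 'calories': 3},
--     ... ]
--     >>> optimal_mixture(ingredients)
--     ((44, 56), 62842880)
--     """
--     best_mixture = None
--     best_score = 0
--     for mixture in numbers_with_sum(total_amount, len(ingredients)):
--         s = score(ingredients, mixture)
--         c = calories(ingredients, mixture)
--         if target_calories is not None and c != target_calories:
--             continue
--         if s > best_score:
--             best_mixture = mixture
--             best_score = s
--     return best_mixture, best_score
--
-- def numbers_with_sum(total, count):
--     """
--     Generate all combinations of `count` numbers which sum to `total`.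
--     >>> list(numbers_with_sum(3, 3))
--     [(0, 0, 3), (0, 1, 2), (0, 2, 1), (0, 3, 0), (1, 0, 2), (1, 1, 1), (1, 2, 0), (2, 0, 1), (2, 1, 0), (3, 0, 0)]
--     """
--     for bars in combinations_with_replacement(range(total + 1), count - 1):
--         bars = (0,) + bars + (total,)
--         yield tuple( hi - lo for lo, hi in pairwise(bars) )
-- ===== SOURCE B (Python) =====
-- def optimal_mixture(ingredients, total_amount=100, target_calories=None):
--     best_mixture = None
--     best_score = 0
--     for mixture in numbers_with_sum(total_amount, len(ingredients)):
--         cap = dur = fla = tex = cal = 0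
--         for ingr, amount in zip(ingredients, mixture):
--             cap += ingr['capacity'] * amount
--             dur += ingr['durability'] * amount
--             fla += ingr['flavor'] * amount
--             tex += ingr['texture'] * amount
--             cal += ingr['calories'] * amount
--         if target_calories is not None and cal != target_calories:
--             continue
--         s = 0 if min(cap, dur, fla, tex) <= 0 else cap * dur * fla * tex
--         if s > best_score:
--             best_mixture = mixture
--             best_score = s
--     return best_mixture, best_score
--
-- def numbers_with_sum(total, count):
--     if count == 1:
--         yield (total,)
--         return
--     for first in range(total + 1):
--         for rest in numbers_with_sum(total - first, count - 1):
--             yield (first,) + rest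
-- ===== Notes on version B (the rewrite author's own statement) =====
-- stated objective: alternative
-- what changed: numbers_with_sum is re-implemented as a direct recursion on the tuple structure (choose the first amount, recurse on the remainder) instead of the combinations_with_replacement/pairwise-difference stars-and-bars trick, and the per-mixture scoring is fused into a single pass over zip(ingredients, mixture) accumulating all four properties and calories at once instead of five separate generator sums.
import Mathlib
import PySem

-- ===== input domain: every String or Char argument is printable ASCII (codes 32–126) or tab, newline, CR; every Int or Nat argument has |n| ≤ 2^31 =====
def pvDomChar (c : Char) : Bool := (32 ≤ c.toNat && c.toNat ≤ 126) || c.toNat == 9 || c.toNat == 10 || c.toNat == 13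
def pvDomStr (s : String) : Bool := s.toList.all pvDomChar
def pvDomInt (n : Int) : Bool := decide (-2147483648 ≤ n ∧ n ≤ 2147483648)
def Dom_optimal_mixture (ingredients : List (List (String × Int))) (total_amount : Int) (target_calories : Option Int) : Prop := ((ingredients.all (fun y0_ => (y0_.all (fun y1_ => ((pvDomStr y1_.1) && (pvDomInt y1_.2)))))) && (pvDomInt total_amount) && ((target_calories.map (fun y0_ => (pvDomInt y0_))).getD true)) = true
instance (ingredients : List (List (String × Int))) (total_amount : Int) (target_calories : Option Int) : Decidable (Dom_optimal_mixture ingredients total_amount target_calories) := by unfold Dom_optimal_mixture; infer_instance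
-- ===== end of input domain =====

-- B replaces the stars-and-bars (combinations_with_replacement + pairwise differences) enumeration by a
-- direct recursion on the tuple structure and fuses the five per-mixture sums into one pass; same results.


-- ===== PORT A =====
-- ingr[prop]: first-match lookup in the association list; exact on Pre_ (key present wherever A reads one;
-- on a missing key Python raises KeyError, excluded by Pre_)
def pvDGet (d : List (String × Int)) (k : String) : Int :=
  match d.find? (fun p => p.1 == k) with
  | some p => p.2
  | none => 0

-- score(ingredients, mixture)
def pvScoreA (ingredients : List (List (String × Int))) (mixture : List Int) : Int :=
  let scores := ["capacity", "durability", "flavor", "texture"].map (fun prop =>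
    ((ingredients.zip mixture).map (fun q => pvDGet q.1 prop * q.2)).sum)
  if scores.any (fun s => decide (s ≤ 0)) then 0
  else
    -- product = reduce(mul, scores): first element is the initial accumulator (scores is never empty)
    match scores with
    | [] => 0
    | s0 :: rest => rest.foldl (· * ·) s0

-- calories(ingredients, mixture)
def pvCaloriesA (ingredients : List (List (String × Int))) (mixture : List Int) : Int :=
  ((ingredients.zip mixture).map (fun q => pvDGet q.1 "calories" * q.2)).sum

-- itertools.combinations_with_replacement(xs, r) in itertools' lexicographic order
def pvCwrA (xs : List Int) : Nat → List (List Int)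
  | 0 => [[]]
  | r + 1 =>
    match xs with
    | [] => []
    | x :: rest => ((pvCwrA (x :: rest) r).map (fun c => x :: c)) ++ pvCwrA rest (r + 1)
termination_by r => (r, xs.length)

-- tuple(hi - lo for lo, hi in pairwise(bars))
def pvDiffsA : List Int → List Int
  | a :: b :: rest => (b - a) :: pvDiffsA (b :: rest)
  | _ => []

-- numbers_with_sum(total, count); count = len(ingredients)
def pvNwsA (total : Int) (count : Nat) : List (List Int) :=
  (pvCwrA (PySem.List.pyRange 0 (total + 1) 1) (count - 1)).map (fun bars =>
    pvDiffsA (0 :: (bars ++ [total])))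

def optimal_mixture (ingredients : List (List (String × Int))) (total_amount : Int) (target_calories : Option Int) : Option (List Int) × Int :=
  (pvNwsA total_amount ingredients.length).foldl
    (fun best mixture =>
      let s := pvScoreA ingredients mixture
      let c := pvCaloriesA ingredients mixture
      if (match target_calories with | some tc => c != tc | none => false) = true then best
      else if s > best.2 then (some mixture, s) else best)
    (none, 0)

-- ===== PORT B =====
-- numbers_with_sum of Source B: recursion on count (count = 0 is unreachable under Pre_: the Python generator
-- never yields and never returns there for total ≥ 0)
def pvNwsB (total : Int) : Nat → List (List Int)
  | 0 => []
  | 1 => [[total]]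
  | n + 2 => (PySem.List.pyRange 0 (total + 1) 1).flatMap (fun first =>
      (pvNwsB (total - first) (n + 1)).map (fun rest => first :: rest))

-- the fused single pass over zip(ingredients, mixture): (cap, dur, fla, tex, cal)
def pvTallyB (ingredients : List (List (String × Int))) (mixture : List Int) : Int × Int × Int × Int × Int :=
  (ingredients.zip mixture).foldl
    (fun acc q =>
      (acc.1 + pvDGet q.1 "capacity" * q.2,
       acc.2.1 + pvDGet q.1 "durability" * q.2,
       acc.2.2.1 + pvDGet q.1 "flavor" * q.2,
       acc.2.2.2.1 + pvDGet q.1 "texture" * q.2,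
       acc.2.2.2.2 + pvDGet q.1 "calories" * q.2))
    (0, 0, 0, 0, 0)

def optimal_mixture_alt (ingredients : List (List (String × Int))) (total_amount : Int) (target_calories : Option Int) : Option (List Int) × Int :=
  (pvNwsB total_amount ingredients.length).foldl
    (fun best mixture =>
      let t := pvTallyB ingredients mixture
      let cap := t.1; let dur := t.2.1; let fla := t.2.2.1; let tex := t.2.2.2.1; let cal := t.2.2.2.2
      if (match target_calories with | some tc => cal != tc | none => false) = true then best
      else
        let s := if min (min (min cap dur) fla) tex ≤ 0 then 0 else cap * dur * fla * tex
        if s > best.2 then (some mixture, s) else best)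
    (none, 0)

-- ===== PRECONDITION & SPEC =====
-- Pre_ excludes exactly the inputs on which Python A raises: empty ingredients (ValueError from
-- combinations_with_replacement with r = -1), and an ingredient dict missing one of the five property keys
-- in any run that scores at least one mixture, i.e. unless total_amount < 0 with ≥ 2 ingredients (KeyError).
def Pre_optimal_mixture (ingredients : List (List (String × Int))) (total_amount : Int) (target_calories : Option Int) : Prop :=
  ingredients ≠ [] ∧
  ((total_amount < 0 ∧ 2 ≤ ingredients.length) ∨
   ∀ d ∈ ingredients, ∀ k ∈ ["capacity", "durability", "flavor", "texture", "calories"],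
     (d.map Prod.fst).contains k = true)
instance (ingredients : List (List (String × Int))) (total_amount : Int) (target_calories : Option Int) : Decidable (Pre_optimal_mixture ingredients total_amount target_calories) := by unfold Pre_optimal_mixture; infer_instance

def pvWitness_optimal_mixture : (List (List (String × Int))) × Int × Option Int :=
  ([[("capacity", 1), ("durability", 1), ("flavor", 2), ("texture", 1), ("calories", 3)],
    [("capacity", 2), ("durability", 1), ("flavor", 1), ("texture", 1), ("calories", 1)]], 3, none)

def Spec_optimal_mixture (ingredients : List (List (String × Int))) (total_amount : Int) (target_calories : Option Int) (out : Option (List Int) × Int) : Prop := out = optimal_mixture_alt ingredients total_amount target_calories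
instance (ingredients : List (List (String × Int))) (total_amount : Int) (target_calories : Option Int) (out : Option (List Int) × Int) : Decidable (Spec_optimal_mixture ingredients total_amount target_calories out) := by unfold Spec_optimal_mixture; infer_instance

-- ===== CLAIM (what is proved, stated in full; the proofs are below) =====
def Claim_equal_optimal_mixture : Prop := ∀ (ingredients : List (List (String × Int))) (total_amount : Int) (target_calories : Option Int), Dom_optimal_mixture ingredients total_amount target_calories → Pre_optimal_mixture ingredients total_amount target_calories → Spec_optimal_mixture ingredients total_amount target_calories (optimal_mixture ingredients total_amount target_calories)

-- ===== LEMMAS AND PROOFS =====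

-- add 1 to the head of a list (shift of the leading difference)
def pvBump : List Int → List Int
  | [] => []
  | x :: xs => (x + 1) :: xs

theorem pvDiffs_bump (a t : Int) (bs : List Int) :
    pvDiffsA (a :: bs ++ [t]) = pvBump (pvDiffsA ((a + 1) :: bs ++ [t])) := by
  cases bs with
  | nil => simp [pvDiffsA, pvBump]; ring
  | cons b rest => simp [pvDiffsA, pvBump]; ring

theorem pvRange_shift_fuel : ∀ (n : Nat) (a b : Int), (b - a).toNat ≤ n →
    PySem.List.pyRange (a + 1) (b + 1) 1 = (PySem.List.pyRange a b 1).map (· + 1) := by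
  intro n
  induction n with
  | zero =>
    intro a b h
    rw [PySem.List.pyRange_one_eq_nil (by omega), PySem.List.pyRange_one_eq_nil (by omega),
      List.map_nil]
  | succ m ih =>
    intro a b h
    by_cases hab : a < b
    · rw [PySem.List.pyRange_one_cons (by omega : a + 1 < b + 1),
        PySem.List.pyRange_one_cons hab, List.map_cons, ih (a + 1) b (by omega)]
    · rw [PySem.List.pyRange_one_eq_nil (by omega), PySem.List.pyRange_one_eq_nil (by omega),
        List.map_nil]

theorem pvRange_shift (a b : Int) :
    PySem.List.pyRange (a + 1) (b + 1) 1 = (PySem.List.pyRange a b 1).map (· + 1) :=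
  pvRange_shift_fuel (b - a).toNat a b le_rfl

theorem pvNwsB_step (d : Int) (r : Nat) (hd : 0 ≤ d) :
    pvNwsB d (r + 2) =
      (pvNwsB d (r + 1)).map (fun m => 0 :: m) ++ (pvNwsB (d - 1) (r + 2)).map pvBump := by
  show (PySem.List.pyRange 0 (d + 1) 1).flatMap _ = _
  rw [PySem.List.pyRange_one_cons (by omega : (0:Int) < d + 1), List.flatMap_cons,
    pvRange_shift 0 d, List.flatMap_map]
  congr 1
  · norm_num
  · show _ = ((PySem.List.pyRange 0 (d - 1 + 1) 1).flatMap
        (fun first => (pvNwsB (d - 1 - first) (r + 1)).map (fun rest => first :: rest))).map pvBump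
    rw [show d - 1 + 1 = d by ring, List.map_flatMap]
    congr 1
    funext f'
    rw [List.map_map]
    have : d - (f' + 1) = d - 1 - f' := by ring
    rw [this]
    rfl

theorem pvKey : ∀ (n r : Nat) (a t : Int), r + (t + 1 - a).toNat ≤ n →
    (pvCwrA (PySem.List.pyRange a (t + 1) 1) r).map (fun bs => pvDiffsA (a :: bs ++ [t]))
      = pvNwsB (t - a) (r + 1) := by
  intro n
  induction n with
  | zero =>
    intro r a t h
    have hr : r = 0 := by omega
    subst hr
    simp [pvCwrA, pvNwsB, pvDiffsA]
  | succ m ih =>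
    intro r a t h
    cases r with
    | zero => simp [pvCwrA, pvNwsB, pvDiffsA]
    | succ r' =>
      by_cases hat : a ≤ t
      · rw [PySem.List.pyRange_one_cons (by omega : a < t + 1)]
        rw [show pvCwrA (a :: PySem.List.pyRange (a + 1) (t + 1) 1) (r' + 1)
            = ((pvCwrA (a :: PySem.List.pyRange (a + 1) (t + 1) 1) r').map (fun c => a :: c))
              ++ pvCwrA (PySem.List.pyRange (a + 1) (t + 1) 1) (r' + 1) from by
          rw [pvCwrA]]
        rw [List.map_append, List.map_map]
        have h1 : (pvCwrA (a :: PySem.List.pyRange (a + 1) (t + 1) 1) r').map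
            ((fun bs => pvDiffsA (a :: bs ++ [t])) ∘ (fun c => a :: c))
            = ((pvCwrA (a :: PySem.List.pyRange (a + 1) (t + 1) 1) r').map
              (fun bs => pvDiffsA (a :: bs ++ [t]))).map (fun m => 0 :: m) := by
          rw [List.map_map]
          congr 1
          funext bs
          show pvDiffsA (a :: (a :: bs) ++ [t]) = 0 :: pvDiffsA (a :: bs ++ [t])
          show (a - a) :: pvDiffsA (a :: (bs ++ [t])) = 0 :: pvDiffsA (a :: bs ++ [t])
          simp
        rw [h1]
        have h2 : (pvCwrA (a :: PySem.List.pyRange (a + 1) (t + 1) 1) r').map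
            (fun bs => pvDiffsA (a :: bs ++ [t])) = pvNwsB (t - a) (r' + 1) := by
          rw [← PySem.List.pyRange_one_cons (by omega : a < t + 1)]
          exact ih r' a t (by omega)
        have h3 : (pvCwrA (PySem.List.pyRange (a + 1) (t + 1) 1) (r' + 1)).map
            (fun bs => pvDiffsA (a :: bs ++ [t]))
            = (pvNwsB (t - a - 1) (r' + 2)).map pvBump := by
          have hbump : (fun bs => pvDiffsA (a :: bs ++ [t]))
              = fun bs => pvBump (pvDiffsA ((a + 1) :: bs ++ [t])) := by
            funext bs; exact pvDiffs_bump a t bs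
          rw [hbump, show (fun bs => pvBump (pvDiffsA ((a + 1) :: bs ++ [t])))
              = pvBump ∘ (fun bs => pvDiffsA ((a + 1) :: bs ++ [t])) from rfl,
            ← List.map_map, ih (r' + 1) (a + 1) t (by omega),
            show t - (a + 1) = t - a - 1 by ring]
        rw [h2, h3, ← pvNwsB_step (t - a) r' (by omega)]
      · rw [PySem.List.pyRange_one_eq_nil (by omega)]
        rw [show pvCwrA ([] : List Int) (r' + 1) = [] from by rw [pvCwrA]]
        show ([] : List (List Int)) = (PySem.List.pyRange 0 (t - a + 1) 1).flatMap _
        rw [PySem.List.pyRange_one_eq_nil (by omega), List.flatMap_nil]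

theorem pvNws_eq (t : Int) (c : Nat) (hc : 1 ≤ c) : pvNwsA t c = pvNwsB t c := by
  obtain ⟨c', rfl⟩ : ∃ c', c = c' + 1 := ⟨c - 1, by omega⟩
  have := pvKey (c' + (t + 1).toNat) c' 0 t (by omega)
  simpa [pvNwsA] using this

theorem pvTally_go (l : List ((List (String × Int)) × Int)) (acc : Int × Int × Int × Int × Int) :
    l.foldl
      (fun acc q =>
        (acc.1 + pvDGet q.1 "capacity" * q.2,
         acc.2.1 + pvDGet q.1 "durability" * q.2,
         acc.2.2.1 + pvDGet q.1 "flavor" * q.2,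
         acc.2.2.2.1 + pvDGet q.1 "texture" * q.2,
         acc.2.2.2.2 + pvDGet q.1 "calories" * q.2)) acc
    = (acc.1 + (l.map (fun q => pvDGet q.1 "capacity" * q.2)).sum,
       acc.2.1 + (l.map (fun q => pvDGet q.1 "durability" * q.2)).sum,
       acc.2.2.1 + (l.map (fun q => pvDGet q.1 "flavor" * q.2)).sum,
       acc.2.2.2.1 + (l.map (fun q => pvDGet q.1 "texture" * q.2)).sum,
       acc.2.2.2.2 + (l.map (fun q => pvDGet q.1 "calories" * q.2)).sum) := by
  induction l generalizing acc with
  | nil => simp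
  | cons q l ih =>
    rw [List.foldl_cons, ih]
    simp only [List.map_cons, List.sum_cons, Prod.mk.injEq]
    refine ⟨by ring, by ring, by ring, by ring, by ring⟩

theorem pvTally_eq (ingredients : List (List (String × Int))) (mixture : List Int) :
    pvTallyB ingredients mixture =
      (((ingredients.zip mixture).map (fun q => pvDGet q.1 "capacity" * q.2)).sum,
       ((ingredients.zip mixture).map (fun q => pvDGet q.1 "durability" * q.2)).sum,
       ((ingredients.zip mixture).map (fun q => pvDGet q.1 "flavor" * q.2)).sum,
       ((ingredients.zip mixture).map (fun q => pvDGet q.1 "texture" * q.2)).sum,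
       ((ingredients.zip mixture).map (fun q => pvDGet q.1 "calories" * q.2)).sum) := by
  rw [pvTallyB, pvTally_go]
  simp

theorem pvScore_eq (ingredients : List (List (String × Int))) (mixture : List Int) :
    pvScoreA ingredients mixture =
      (if min (min (min (((ingredients.zip mixture).map (fun q => pvDGet q.1 "capacity" * q.2)).sum)
                       (((ingredients.zip mixture).map (fun q => pvDGet q.1 "durability" * q.2)).sum))
                  (((ingredients.zip mixture).map (fun q => pvDGet q.1 "flavor" * q.2)).sum))
             (((ingredients.zip mixture).map (fun q => pvDGet q.1 "texture" * q.2)).sum) ≤ 0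
       then 0
       else ((ingredients.zip mixture).map (fun q => pvDGet q.1 "capacity" * q.2)).sum
          * ((ingredients.zip mixture).map (fun q => pvDGet q.1 "durability" * q.2)).sum
          * ((ingredients.zip mixture).map (fun q => pvDGet q.1 "flavor" * q.2)).sum
          * ((ingredients.zip mixture).map (fun q => pvDGet q.1 "texture" * q.2)).sum) := by
  simp only [pvScoreA, List.map_cons, List.map_nil, List.any_cons, List.any_nil,
    Bool.or_eq_true, decide_eq_true_eq, Bool.or_false, List.foldl_cons, List.foldl_nil]
  split_ifs <;> first | rfl | omega

theorem pvStep_eq (ingredients : List (List (String × Int))) (target_calories : Option Int)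
    (best : Option (List Int) × Int) (mixture : List Int) :
    (fun (best : Option (List Int) × Int) mixture =>
      let s := pvScoreA ingredients mixture
      let c := pvCaloriesA ingredients mixture
      if (match target_calories with | some tc => c != tc | none => false) = true then best
      else if s > best.2 then (some mixture, s) else best) best mixture
    = (fun (best : Option (List Int) × Int) mixture =>
      let t := pvTallyB ingredients mixture
      let cap := t.1; let dur := t.2.1; let fla := t.2.2.1; let tex := t.2.2.2.1; let cal := t.2.2.2.2
      if (match target_calories with | some tc => cal != tc | none => false) = true then best
      else
        let s := if min (min (min cap dur) fla) tex ≤ 0 then 0 else cap * dur * fla * tex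
        if s > best.2 then (some mixture, s) else best) best mixture := by
  simp only [pvTally_eq, pvScore_eq, pvCaloriesA]

-- ===== VERDICT (by name: the statement is the Claim_ definition above) =====
theorem optimal_mixture_spec : Claim_equal_optimal_mixture := by
  intro ing t tc _ hpre
  unfold Spec_optimal_mixture optimal_mixture optimal_mixture_alt
  have hlen : 1 ≤ ing.length := by
    cases ing with
    | nil => exact absurd rfl hpre.1
    | cons _ _ => simp
  rw [pvNws_eq t ing.length hlen]
  exact List.foldl_ext _ _ _ (fun acc m hm => pvStep_eq ing tc acc m)
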